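-- pv_equiv track=rewrite | github.com/dexdot20/flask-ai-agent-studio | canvas_service.py | determine_canvas_mode
-- ===== SOURCE A (Python) =====
-- CANVAS_MODE_DOCUMENT = "document"
--
-- CANVAS_MODE_PROJECT = "project"
--
-- def determine_canvas_mode(documents: list[dict] | None) -> str:
--     normalized_documents = documents if isinstance(documents, list) else []
--     scope_ids = {
--         str(document.get("project_id") or document.get("workspace_id") or "").strip()
--         for document in normalized_documents
--         if str(document.get("project_id") or document.get("workspace_id") or "").strip()
--     }
--     paths = {str(document.get("path") or "").strip() for document in normalized_documents if str(document.get("path") or "").strip()}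
--     if len(normalized_documents) > 1 or scope_ids or len(paths) > 1:
--         return CANVAS_MODE_PROJECT
--     return CANVAS_MODE_DOCUMENT
-- ===== SOURCE B (Python) =====
-- CANVAS_MODE_DOCUMENT = "document"
--
-- CANVAS_MODE_PROJECT = "project"
--
--
-- def determine_canvas_mode(documents):
--     normalized_documents = documents if isinstance(documents, list) else []
--     has_scope = False
--     for document in normalized_documents:
--         scope = str(document.get("project_id") or document.get("workspace_id") or "").strip()
--         if scope:
--             has_scope = True
--     if len(normalized_documents) > 1 or has_scope:
--         return CANVAS_MODE_PROJECT
--     return CANVAS_MODE_DOCUMENT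
-- ===== Notes on version B (the rewrite author's own statement) =====
-- stated objective: simpler
-- what changed: B replaces A's two set comprehensions (scope ids and paths) with a single boolean-accumulating loop; the paths set is dropped entirely since more than one distinct non-empty path implies more than one document, making that disjunct redundant.
import Mathlib
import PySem

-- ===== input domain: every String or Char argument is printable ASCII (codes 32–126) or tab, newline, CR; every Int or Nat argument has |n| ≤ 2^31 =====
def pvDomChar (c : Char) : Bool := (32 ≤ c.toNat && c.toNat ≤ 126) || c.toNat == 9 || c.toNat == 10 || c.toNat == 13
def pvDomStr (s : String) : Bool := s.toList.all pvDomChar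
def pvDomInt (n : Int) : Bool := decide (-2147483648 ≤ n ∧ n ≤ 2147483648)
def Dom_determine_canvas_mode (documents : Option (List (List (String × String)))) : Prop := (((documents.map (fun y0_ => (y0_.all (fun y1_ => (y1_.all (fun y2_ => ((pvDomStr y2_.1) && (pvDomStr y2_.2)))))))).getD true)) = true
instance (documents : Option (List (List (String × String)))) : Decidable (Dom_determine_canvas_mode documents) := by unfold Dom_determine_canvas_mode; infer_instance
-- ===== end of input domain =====

-- ===== PORT A =====
-- B replaces A's two set comprehensions by one boolean-accumulating loop (the redundant
-- paths set is dropped: >1 distinct non-empty paths forces >1 documents); objective: simpler.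

-- str(d.get(k1) or d.get(k2) or "").strip()  for an association-list dict (first-match lookup)
def pvOrStr (o : Option String) (alt : String) : String :=
  match o with
  | some s => if s = "" then alt else s
  | none => alt

-- A's comprehension key: str(document.get("project_id") or document.get("workspace_id") or "").strip()
def pvScopeOf (d : List (String × String)) : String :=
  PySem.Str.strip (pvOrStr (d.lookup "project_id") (pvOrStr (d.lookup "workspace_id") ""))

def pvPathOf (d : List (String × String)) : String :=
  PySem.Str.strip (pvOrStr (d.lookup "path") "")

def determine_canvas_mode (documents : Option (List (List (String × String)))) : String :=
  let normalized_documents := documents.getD []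
  let scope_ids : PySem.Set String :=
    normalized_documents.foldl
      (fun s d => if pvScopeOf d ≠ "" then PySem.Set.add s (pvScopeOf d) else s) PySem.Set.empty
  let paths : PySem.Set String :=
    normalized_documents.foldl
      (fun s d => if pvPathOf d ≠ "" then PySem.Set.add s (pvPathOf d) else s) PySem.Set.empty
  if normalized_documents.length > 1 ∨ scope_ids ≠ [] ∨ paths.length > 1 then "project"
  else "document"

-- ===== PORT B =====
-- B's per-document scope: the same Python expression, B's own helper
def pvScopeOfB (d : List (String × String)) : String :=
  PySem.Str.strip (pvOrStr (d.lookup "project_id") (pvOrStr (d.lookup "workspace_id") ""))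

def determine_canvas_mode_alt (documents : Option (List (List (String × String)))) : String :=
  let normalized_documents := documents.getD []
  let has_scope := normalized_documents.foldl (fun b d => if pvScopeOfB d ≠ "" then true else b) false
  if normalized_documents.length > 1 ∨ has_scope = true then "project"
  else "document"

-- ===== PRECONDITION & SPEC =====
def Spec_determine_canvas_mode (documents : Option (List (List (String × String)))) (out : String) : Prop := out = determine_canvas_mode_alt documents
instance (documents : Option (List (List (String × String)))) (out : String) : Decidable (Spec_determine_canvas_mode documents out) := by unfold Spec_determine_canvas_mode; infer_instance

-- ===== CLAIM (what is proved, stated in full; the proofs are below) =====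
def Claim_equal_determine_canvas_mode : Prop := ∀ (documents : Option (List (List (String × String)))), Dom_determine_canvas_mode documents → Spec_determine_canvas_mode documents (determine_canvas_mode documents)

-- ===== LEMMAS AND PROOFS =====

theorem pvSet_add_ne_nil {α : Type} [BEq α] (s : PySem.Set α) (x : α) :
    PySem.Set.add s x ≠ [] := by
  simp only [PySem.Set.add]
  split
  · intro h; subst h; simp [PySem.Set.contains] at *
  · simp

-- an 'add-if' fold is empty iff the accumulator was empty and no element passed the test
theorem pvFoldl_addIf_eq_nil {α : Type} (p : α → String) (l : List α) (acc : PySem.Set String) :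
    (l.foldl (fun s d => if p d ≠ "" then PySem.Set.add s (p d) else s) acc) = [] ↔
      acc = [] ∧ ∀ d ∈ l, p d = "" := by
  induction l generalizing acc with
  | nil => simp
  | cons h t ih =>
    simp only [List.foldl_cons]
    by_cases hp : p h = ""
    · rw [if_neg (fun hc => hc hp), ih]
      simp [hp]
    · rw [if_pos hp, ih]
      constructor
      · rintro ⟨ha, -⟩; exact absurd ha (pvSet_add_ne_nil acc (p h))
      · rintro ⟨-, hall⟩; exact absurd (hall h (List.mem_cons_self)) hp

-- each step of an 'add-if' fold grows the set by at most one
theorem pvFoldl_addIf_length {α : Type} (p : α → String) (l : List α) (acc : PySem.Set String) :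
    (l.foldl (fun s d => if p d ≠ "" then PySem.Set.add s (p d) else s) acc).length ≤
      acc.length + l.length := by
  induction l generalizing acc with
  | nil => simp
  | cons h t ih =>
    simp only [List.foldl_cons, List.length_cons]
    calc (List.foldl _ (if p h ≠ "" then PySem.Set.add acc (p h) else acc) t).length
        ≤ (if p h ≠ "" then PySem.Set.add acc (p h) else acc).length + t.length := ih _
      _ ≤ acc.length + (t.length + 1) := by
          split
          · simp only [PySem.Set.add]
            split
            · omega
            · simp; omega
          · omega

-- a boolean 'set-if' fold is true iff the start was true or some element passes the test
theorem pvFoldl_orIf {α : Type} (p : α → String) (l : List α) (b : Bool) :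
    (l.foldl (fun b d => if p d ≠ "" then true else b) b) = true ↔
      b = true ∨ ∃ d ∈ l, p d ≠ "" := by
  induction l generalizing b with
  | nil => simp
  | cons h t ih =>
    simp only [List.foldl_cons]
    by_cases hp : p h = ""
    · rw [if_neg (fun hc => hc hp), ih]
      simp [hp]
    · rw [if_pos hp, ih]
      simp only [List.exists_mem_cons_iff]
      tauto

-- ===== VERDICT (by name: the statement is the Claim_ definition above) =====
theorem determine_canvas_mode_spec : Claim_equal_determine_canvas_mode := by
  intro documents _
  show determine_canvas_mode documents = determine_canvas_mode_alt documents
  unfold determine_canvas_mode determine_canvas_mode_alt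
  set norm := documents.getD [] with hn
  show (if norm.length > 1 ∨
          (norm.foldl (fun s d => if pvScopeOf d ≠ "" then PySem.Set.add s (pvScopeOf d) else s)
            PySem.Set.empty) ≠ [] ∨
          (norm.foldl (fun s d => if pvPathOf d ≠ "" then PySem.Set.add s (pvPathOf d) else s)
            PySem.Set.empty).length > 1 then "project" else "document")
      = (if norm.length > 1 ∨
          (norm.foldl (fun b d => if pvScopeOfB d ≠ "" then true else b) false) = true
          then "project" else "document")
  refine if_congr ?_ rfl rfl
  have hscope : ((norm.foldl
      (fun s d => if pvScopeOf d ≠ "" then PySem.Set.add s (pvScopeOf d) else s)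
      PySem.Set.empty) ≠ []) ↔
      (norm.foldl (fun b d => if pvScopeOfB d ≠ "" then true else b) false) = true := by
    have hsame : pvScopeOfB = pvScopeOf := rfl
    rw [hsame, ne_eq, pvFoldl_addIf_eq_nil, pvFoldl_orIf]
    simp only [PySem.Set.empty]
    simp [not_forall]
  have hplen := pvFoldl_addIf_length pvPathOf norm PySem.Set.empty
  constructor
  · rintro (h | h | h)
    · exact Or.inl h
    · exact Or.inr (hscope.mp h)
    · refine Or.inl ?_
      simp only [PySem.Set.empty, List.length_nil, Nat.zero_add] at hplen h
      omega
  · rintro (h | h)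
    · exact Or.inl h
    · exact Or.inr (Or.inl (hscope.mpr h))
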